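-- pv_equiv track=rewrite | github.com/WillyMaikowski/cc5509 | digitRecognition/utils.py | mBlackTop
-- ===== SOURCE A (Python) =====
-- BACKGROUND = 240
--
-- FOREGROUND = 0
--
-- MARKED = 1
--
-- def mBlackTop( img ):
--     aux = img.copy()
--     for i in range( 1, len( aux ) ):
--         for j in range( len( aux[i] ) ):
--             if aux[i][j] == FOREGROUND:
--                 continue
--             elif aux[i][j] == BACKGROUND and ( aux[i - 1][j] == FOREGROUND or aux[i - 1][j] == MARKED ):
--                 aux[i][j] = MARKED
--     return aux
-- ===== SOURCE B (Python) =====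
-- BACKGROUND = 240
--
-- FOREGROUND = 0
--
-- MARKED = 1
--
-- def mBlackTop(img):
--     # Column-major sweep: one running 'active' flag per column meaning
--     # "the cell above is foreground or marked"; builds fresh rows (does not
--     # mutate the caller's rows, unlike the original).
--     out = [list(row) for row in img]
--     if not out:
--         return out
--     width = max(len(row) for row in out)
--     for j in range(width):
--         top = out[0]
--         active = j < len(top) and top[j] in (FOREGROUND, MARKED)
--         for i in range(1, len(out)):
--             row = out[i]
--             if j >= len(row):
--                 active = False
--                 continue
--             v = row[j]
--             if v == FOREGROUND:
--                 active = True
--             elif v == BACKGROUND: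
--                 if active:
--                     row[j] = MARKED
--                 else:
--                     active = False
--             else:
--                 active = (v == MARKED)
--     return out
-- ===== Notes on version B (the rewrite author's own statement) =====
-- stated objective: alternative
-- what changed: A sweeps row-major, re-reading the already-updated previous row aux[i-1][j] for every cell; B sweeps column-major, threading one running boolean 'active' flag down each column ('cell above is foreground or marked') so the previous row is never re-read, and B builds fresh rows instead of mutating the caller's lists.
import Mathlib
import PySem

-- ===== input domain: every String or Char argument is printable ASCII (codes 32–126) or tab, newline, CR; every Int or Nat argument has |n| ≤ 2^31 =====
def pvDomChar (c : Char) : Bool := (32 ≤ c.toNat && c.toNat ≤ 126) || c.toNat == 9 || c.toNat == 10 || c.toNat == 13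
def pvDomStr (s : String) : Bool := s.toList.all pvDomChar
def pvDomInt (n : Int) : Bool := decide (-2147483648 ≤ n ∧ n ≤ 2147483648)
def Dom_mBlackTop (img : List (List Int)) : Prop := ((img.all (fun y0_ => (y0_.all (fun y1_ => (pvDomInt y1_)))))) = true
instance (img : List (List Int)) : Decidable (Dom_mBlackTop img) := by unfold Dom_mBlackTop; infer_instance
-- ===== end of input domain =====

-- B replaces A's row-major sweep (re-reading aux[i-1][j]) by a column-major sweep that
-- threads one running 'active' flag down each column; return values agree — note that
-- the Python A mutates the caller's row lists in place while B builds fresh rows, and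
-- the equivalence proved here is about the return value only.

def BACKGROUND : Int := 240
def FOREGROUND : Int := 0
def MARKED : Int := 1

-- ===== PORT A =====
-- the inner 'for j' body: aux[i-1][j] out of range is an IndexError in Python; those
-- inputs are excluded by Pre_mBlackTop, here the read yields the dummy -1.
def innerGA (i : Int) (aux : List (List Int)) (j : Int) : List (List Int) :=
  let cell := (aux.getD i.toNat []).getD j.toNat 0
  if cell = FOREGROUND then aux
  else if cell = BACKGROUND ∧
      ((aux.getD (i - 1).toNat []).getD j.toNat (-1) = FOREGROUND ∨
       (aux.getD (i - 1).toNat []).getD j.toNat (-1) = MARKED) then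
    aux.set i.toNat ((aux.getD i.toNat []).set j.toNat MARKED)
  else aux

-- the outer 'for i' body
def outerFA (aux : List (List Int)) (i : Int) : List (List Int) :=
  (PySem.List.pyRange 0 ((aux.getD i.toNat []).length : Int) 1).foldl (innerGA i) aux

def mBlackTop (img : List (List Int)) : List (List Int) :=
  (PySem.List.pyRange 1 (img.length : Int) 1).foldl outerFA img

-- ===== PORT B =====
-- the inner 'for i' body of B, walking down one column j with the running flag
def rowStepB (j : Int) (s : List (List Int) × Bool) (i : Int) : List (List Int) × Bool :=
  let o := s.1
  let active := s.2
  let row := o.getD i.toNat []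
  if (row.length : Int) ≤ j then (o, false)
  else
    let v := row.getD j.toNat 0
    if v = FOREGROUND then (o, true)
    else if v = BACKGROUND then
      (if active then (o.set i.toNat (row.set j.toNat MARKED), true) else (o, false))
    else (o, decide (v = MARKED))

-- the outer 'for j' body of B
def colStepB (out : List (List Int)) (j : Int) : List (List Int) :=
  let top := out.getD 0 []
  let active0 : Bool :=
    decide (j < (top.length : Int) ∧ (top.getD j.toNat 0 = FOREGROUND ∨ top.getD j.toNat 0 = MARKED))
  ((PySem.List.pyRange 1 (out.length : Int) 1).foldl (rowStepB j) (out, active0)).1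

def mBlackTop_alt (img : List (List Int)) : List (List Int) :=
  let out := img.map (fun row => row)          -- fresh copies of the rows
  if out.length = 0 then out
  else
    let width := ((PySem.List.max? (out.map (fun row => (row.length : Int))) (fun x => x)).getD 0)
    (PySem.List.pyRange 0 width 1).foldl colStepB out

-- ===== PRECONDITION & SPEC =====
-- Pre_ excludes exactly the inputs where Python A raises IndexError: a BACKGROUND cell
-- in some row whose column index does not exist in the previous row.
def Pre_mBlackTop (img : List (List Int)) : Prop :=
  ∀ i < img.length, ∀ j < (img.getD i []).length,
    (1 ≤ i ∧ (img.getD i []).getD j 0 = 240) → j < (img.getD (i - 1) []).length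
instance (img : List (List Int)) : Decidable (Pre_mBlackTop img) := by
  unfold Pre_mBlackTop; infer_instance

def pvWitness_mBlackTop : List (List Int) := [[240, 0, 7], [240, 240, 240], [240, 1]]

def Spec_mBlackTop (img : List (List Int)) (out : List (List Int)) : Prop := out = mBlackTop_alt img
instance (img : List (List Int)) (out : List (List Int)) : Decidable (Spec_mBlackTop img out) := by
  unfold Spec_mBlackTop; infer_instance

-- ===== CLAIM (what is proved, stated in full; the proofs are below) =====
def Claim_equal_mBlackTop : Prop :=
  ∀ (img : List (List Int)), Dom_mBlackTop img → Pre_mBlackTop img → Spec_mBlackTop img (mBlackTop img)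
-- ===== LEMMAS AND PROOFS =====

-- The common functional description of the result: each row is rewritten cell by cell
-- from the PROCESSED previous row.
def cellNew (prev : List Int) (j : Nat) (v : Int) : Int :=
  if v = 240 ∧ (prev.getD j (-1) = 0 ∨ prev.getD j (-1) = 1) then 1 else v

def stepRow (prev cur : List Int) : List Int := cur.mapIdx (cellNew prev)

def specGo (prev : List Int) (rows : List (List Int)) : List (List Int) :=
  match rows with
  | [] => []
  | r :: rs => stepRow prev r :: specGo (stepRow prev r) rs

def specTop (img : List (List Int)) : List (List Int) :=
  match img with
  | [] => []
  | r :: rs => r :: specGo r rs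

-- generic getD/set helpers
theorem getD_set_ne {α : Type} (l : List α) (m n : Nat) (x d : α) (h : m ≠ n) :
    (l.set m x).getD n d = l.getD n d := by
  by_cases hn : n < l.length
  · rw [List.getD_eq_getElem _ _ (by simpa using hn), List.getD_eq_getElem _ _ hn,
      List.getElem_set_ne h]
  · rw [List.getD_eq_default _ _ (by simpa using Nat.le_of_not_lt hn),
      List.getD_eq_default _ _ (Nat.le_of_not_lt hn)]

theorem getD_set_self {α : Type} (l : List α) (n : Nat) (x d : α) (h : n < l.length) :
    (l.set n x).getD n d = x := by
  rw [List.getD_eq_getElem _ _ (by simpa using h), List.getElem_set_self]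

-- stepRow basics
theorem length_stepRow (prev cur : List Int) : (stepRow prev cur).length = cur.length := by
  simp [stepRow]

theorem getD_stepRow (prev cur : List Int) (j : Nat) (h : j < cur.length) :
    (stepRow prev cur).getD j 0 = cellNew prev j (cur.getD j 0) := by
  rw [List.getD_eq_getElem _ _ (by simp [stepRow, h]), List.getD_eq_getElem _ _ h]
  simp [stepRow]

-- spec basics
theorem length_specGo (rows : List (List Int)) (prev : List Int) :
    (specGo prev rows).length = rows.length := by
  induction rows generalizing prev with
  | nil => rfl
  | cons r rs ih => simp [specGo, ih]

theorem length_specTop (img : List (List Int)) : (specTop img).length = img.length := by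
  cases img with
  | nil => rfl
  | cons r rs => simp [specTop, length_specGo]

theorem rowlen_specGo (rows : List (List Int)) (prev : List Int) (i : Nat) :
    ((specGo prev rows).getD i []).length = ((rows.getD i []).length) := by
  induction rows generalizing prev i with
  | nil => rfl
  | cons r rs ih =>
    cases i with
    | zero => simp [specGo, length_stepRow]
    | succ i => simp only [specGo, List.getD_cons_succ]; exact ih _ _

theorem specGo_getD (rows : List (List Int)) (prev : List Int) (i : Nat) (h : i < rows.length) :
    (specGo prev rows).getD i [] =
      stepRow (if i = 0 then prev else (specGo prev rows).getD (i - 1) []) (rows.getD i []) := by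
  induction rows generalizing prev i with
  | nil => simp at h
  | cons r rs ih =>
    cases i with
    | zero => simp [specGo]
    | succ i =>
      simp only [specGo, List.getD_cons_succ]
      rw [ih (stepRow prev r) i (by simpa using h)]
      cases i with
      | zero => simp
      | succ i' => simp

theorem rowlen_specTop (img : List (List Int)) (i : Nat) :
    ((specTop img).getD i []).length = (img.getD i []).length := by
  cases img with
  | nil => rfl
  | cons r rs =>
    cases i with
    | zero => rfl
    | succ i => simp only [specTop, List.getD_cons_succ]; exact rowlen_specGo _ _ _

theorem specTop_zero (img : List (List Int)) : (specTop img).getD 0 [] = img.getD 0 [] := by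
  cases img with
  | nil => rfl
  | cons r rs => rfl

theorem specTop_succ (img : List (List Int)) (i : Nat) (h : i + 1 < img.length) :
    (specTop img).getD (i + 1) [] = stepRow ((specTop img).getD i []) (img.getD (i + 1) []) := by
  cases img with
  | nil => simp at h
  | cons r rs =>
    simp only [specTop, List.getD_cons_succ]
    rw [specGo_getD rs r i (by simpa using h)]
    cases i with
    | zero => simp
    | succ i' => simp

-- ==== port A = specTop ====
def hyb (prev r : List Int) (k : Nat) : List Int :=
  r.mapIdx (fun j v => if j < k then cellNew prev j v else v)

theorem hyb_length (prev r : List Int) (k : Nat) : (hyb prev r k).length = r.length := by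
  simp [hyb]

theorem set_getD_self {α : Type} (l : List α) (n : Nat) (d : α) (h : n < l.length) :
    l.set n (l.getD n d) = l := by
  rw [List.getD_eq_getElem _ _ h, List.set_getElem_self]

theorem hyb_getD_at (prev r : List Int) (k : Nat) : (hyb prev r k).getD k 0 = r.getD k 0 := by
  by_cases h : k < r.length
  · rw [List.getD_eq_getElem _ _ (by simpa [hyb] using h), List.getD_eq_getElem _ _ h]
    simp [hyb]
  · rw [List.getD_eq_default _ _ (by rw [hyb_length]; omega), List.getD_eq_default _ _ (by omega)]

theorem hyb_zero (prev r : List Int) : hyb prev r 0 = r := by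
  apply List.ext_getElem (by simp [hyb])
  intro n h1 h2
  simp [hyb]

theorem hyb_full (prev r : List Int) : hyb prev r r.length = stepRow prev r := by
  apply List.ext_getElem (by simp [hyb, stepRow])
  intro n h1 h2
  have hn : n < r.length := by simpa [hyb] using h1
  simp [hyb, stepRow, hn]

theorem hyb_succ (prev r : List Int) (k : Nat) (hk : k < r.length) :
    hyb prev r (k + 1) = (hyb prev r k).set k (cellNew prev k (r.getD k 0)) := by
  apply List.ext_getElem (by simp [hyb])
  intro n h1 h2
  have hn : n < r.length := by simpa [hyb] using h1
  rw [List.getElem_set]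
  by_cases hnk : k = n
  · subst hnk
    rw [if_pos rfl]
    simp only [hyb, List.getElem_mapIdx]
    rw [if_pos (Nat.lt_succ_self k), List.getD_eq_getElem _ _ hk]
  · have : ¬ (n < k + 1) ∨ n < k := by omega
    simp only [hyb, List.getElem_mapIdx]
    rcases Nat.lt_or_ge n k with h | h
    · simp [h, Nat.lt_succ_of_lt h, hnk]
    · have : ¬ n < k := by omega
      have : ¬ n < k + 1 := by omega
      simp [*]

theorem inner_eq (aux : List (List Int)) (i : Int) (h1 : 1 ≤ i) (h2 : i.toNat < aux.length) :
    outerFA aux i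
      = aux.set i.toNat (stepRow (aux.getD (i - 1).toNat []) (aux.getD i.toNat [])) := by
  have hne : (i - 1).toNat ≠ i.toNat := by omega
  have key : ∀ k : Nat, k ≤ (aux.getD i.toNat []).length →
      (PySem.List.pyRange 0 (k : Int) 1).foldl (innerGA i) aux
        = aux.set i.toNat (hyb (aux.getD (i - 1).toNat []) (aux.getD i.toNat []) k) := by
    intro k
    induction k with
    | zero =>
      intro _
      rw [show ((0 : Nat) : Int) = 0 by norm_num, PySem.List.pyRange_one_eq_nil le_rfl]
      rw [List.foldl_nil, hyb_zero, set_getD_self _ _ _ h2]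
    | succ k ih =>
      intro hk
      have hk' : k < (aux.getD i.toNat []).length := by omega
      rw [show ((k + 1 : Nat) : Int) = (k : Int) + 1 by push_cast; ring,
        PySem.List.pyRange_one_succ_right (Int.natCast_nonneg k),
        List.foldl_append, ih (by omega), List.foldl_cons, List.foldl_nil]
      show innerGA i _ _ = _
      unfold innerGA
      simp only [Int.toNat_natCast]
      rw [getD_set_self _ _ _ _ h2, getD_set_ne _ _ _ _ _ (Ne.symm hne), hyb_getD_at,
        hyb_succ _ _ _ hk', List.set_set]
      split_ifs with hf hc
      · unfold cellNew
        rw [if_neg (by rw [hf]; norm_num [FOREGROUND, BACKGROUND])]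
        rw [← hyb_getD_at (aux.getD (i - 1).toNat []) _ k, set_getD_self _ _ _ (by rw [hyb_length]; omega)]
      · unfold cellNew
        rw [if_pos (by simpa [BACKGROUND, FOREGROUND, MARKED] using hc)]
        rfl
      · unfold cellNew
        rw [if_neg (by simpa [BACKGROUND, FOREGROUND, MARKED] using hc)]
        rw [← hyb_getD_at (aux.getD (i - 1).toNat []) _ k, set_getD_self _ _ _ (by rw [hyb_length]; omega)]
  have := key (aux.getD i.toNat []).length le_rfl
  unfold outerFA
  rw [this, hyb_full]

def mixA (img : List (List Int)) (k : Nat) : List (List Int) :=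
  (specTop img).take (k + 1) ++ img.drop (k + 1)

theorem outer_partial (img : List (List Int)) (k : Nat) (hk : k < img.length) :
    (PySem.List.pyRange 1 ((k : Int) + 1) 1).foldl outerFA img = mixA img k := by
  induction k with
  | zero =>
    cases img with
    | nil => simp at hk
    | cons r rs =>
      rw [show ((0 : Nat) : Int) + 1 = 1 by norm_num, PySem.List.pyRange_one_eq_nil le_rfl]
      simp [mixA, specTop]
  | succ k ih =>
    have hk' : k < img.length := by omega
    have hlenS : (specTop img).length = img.length := length_specTop img
    have hlenmix : (mixA img k).length = img.length := by
      simp [mixA, hlenS]; omega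
    rw [show ((k + 1 : Nat) : Int) + 1 = ((k : Int) + 1) + 1 by push_cast; ring,
      PySem.List.pyRange_one_succ_right (by omega), List.foldl_append, ih hk',
      List.foldl_cons, List.foldl_nil]
    have htn : ((k : Int) + 1).toNat = k + 1 := by omega
    have htn' : (((k : Int) + 1) - 1).toNat = k := by omega
    rw [inner_eq _ _ (by omega) (by rw [htn, hlenmix]; omega), htn, htn']
    have ha : (mixA img k).getD k [] = (specTop img).getD k [] := by
      rw [List.getD_eq_getElem _ _ (by rw [hlenmix]; omega),
        List.getD_eq_getElem _ _ (by rw [hlenS]; omega)]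
      unfold mixA
      rw [List.getElem_append_left (by simp [hlenS]; omega)]
      simp
    have hb : (mixA img k).getD (k + 1) [] = img.getD (k + 1) [] := by
      rw [List.getD_eq_getElem _ _ (by rw [hlenmix]; omega),
        List.getD_eq_getElem _ _ (by omega)]
      unfold mixA
      rw [List.getElem_append_right (by simp [hlenS])]
      simp [hlenS, Nat.min_eq_left (by omega : k + 1 ≤ img.length)]
    rw [ha, hb, ← specTop_succ img k (by omega)]
    unfold mixA
    rw [List.set_append]
    rw [if_neg (by simp [hlenS])]
    have hdrop : img.drop (k + 1) = img[k + 1]'(by omega) :: img.drop (k + 2) :=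
      List.drop_eq_getElem_cons (by omega)
    rw [hdrop]
    have hset0 : (List.length (List.take (k+1) (specTop img))) = k + 1 := by simp [hlenS]; omega
    rw [hset0]
    simp only [Nat.sub_self, List.set_cons_zero]
    have htake : (specTop img).take (k + 1 + 1)
        = (specTop img).take (k + 1) ++ [(specTop img)[k + 1]'(by rw [hlenS]; omega)] := by
      rw [List.take_add_one, List.getElem?_eq_getElem (by rw [hlenS]; omega)]
      rfl
    rw [List.getD_eq_getElem _ _ (by rw [hlenS]; omega), htake, List.append_assoc]
    rfl

theorem portA_eq_spec (img : List (List Int)) : mBlackTop img = specTop img := by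
  cases img with
  | nil =>
    unfold mBlackTop
    rw [show ((List.length ([] : List (List Int))) : Int) = 0 by simp,
      PySem.List.pyRange_one_eq_nil (by norm_num)]
    rfl
  | cons r rs =>
    unfold mBlackTop
    have h1 : ((r :: rs).length : Int) = (((r :: rs).length - 1 : Nat) : Int) + 1 := by
      simp
    rw [h1, outer_partial _ _ (by simp)]
    unfold mixA
    have : (r :: rs).length - 1 + 1 = (r :: rs).length := by simp
    rw [this, List.take_of_length_le (by rw [length_specTop]), List.drop_of_length_le le_rfl,
      List.append_nil]

-- ==== port B = specTop ====
def colRow (j : Nat) (s r : List Int) : List Int := s.take j ++ r.drop j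

def colmixP (img : List (List Int)) (j i : Nat) : List (List Int) :=
  ((specTop img).zip img).mapIdx
    (fun t p => if t ≤ i then colRow (j + 1) p.1 p.2 else colRow j p.1 p.2)

def colmix (img : List (List Int)) (j : Nat) : List (List Int) :=
  ((specTop img).zip img).map (fun p => colRow j p.1 p.2)

def activeS (img : List (List Int)) (i j : Nat) : Bool :=
  decide (j < (img.getD i []).length ∧
    (((specTop img).getD i []).getD j 0 = 0 ∨ ((specTop img).getD i []).getD j 0 = 1))

theorem length_colRow (j : Nat) (s r : List Int) (h : s.length = r.length) :
    (colRow j s r).length = r.length := by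
  simp [colRow]; omega

theorem colRow_same (j : Nat) (r : List Int) : colRow j r r = r := by
  simp [colRow]

theorem colRow_stable (j : Nat) (s r : List Int) (hlen : s.length = r.length)
    (h : j < r.length → s.getD j 0 = r.getD j 0) : colRow (j + 1) s r = colRow j s r := by
  by_cases hj : j < r.length
  · have hjs : j < s.length := by omega
    unfold colRow
    rw [List.take_add_one, List.getElem?_eq_getElem hjs, List.drop_eq_getElem_cons hj]
    simp only [Option.toList_some, List.append_assoc, List.singleton_append]
    have := h hj
    rw [List.getD_eq_getElem _ _ hjs, List.getD_eq_getElem _ _ hj] at this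
    rw [this]
  · unfold colRow
    rw [List.take_of_length_le (by omega), List.take_of_length_le (by omega),
      List.drop_of_length_le (by omega), List.drop_of_length_le (by omega)]

theorem getD_colRow_at (j : Nat) (s r : List Int) (hlen : s.length = r.length)
    (hj : j < r.length) : (colRow j s r).getD j 0 = r.getD j 0 := by
  unfold colRow
  rw [List.getD_eq_getElem _ _
      (by rw [List.length_append, List.length_take, List.length_drop]; omega),
    List.getD_eq_getElem _ _ hj,
    List.getElem_append_right (by rw [List.length_take]; omega)]
  simp [Nat.min_eq_left (by omega : j ≤ s.length)]

theorem colRow_set (j : Nat) (s r : List Int) (hlen : s.length = r.length)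
    (hj : j < r.length) : (colRow j s r).set j (s.getD j 0) = colRow (j + 1) s r := by
  unfold colRow
  have hjs : j < s.length := by omega
  rw [List.set_append, if_neg (by rw [List.length_take]; omega),
    List.length_take, Nat.min_eq_left (by omega), Nat.sub_self,
    List.drop_eq_getElem_cons hj, List.set_cons_zero,
    List.getD_eq_getElem _ _ hjs,
    show List.take (j + 1) s = List.take j s ++ [s[j]'hjs] from
      by rw [List.take_add_one, List.getElem?_eq_getElem hjs]; rfl,
    List.append_assoc]
  rfl

theorem length_colmixP (img : List (List Int)) (j i : Nat) :
    (colmixP img j i).length = img.length := by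
  simp [colmixP, length_specTop]

theorem length_colmix (img : List (List Int)) (j : Nat) :
    (colmix img j).length = img.length := by
  simp [colmix, length_specTop]

theorem getD_colmixP (img : List (List Int)) (j i t : Nat) (ht : t < img.length) :
    (colmixP img j i).getD t []
      = if t ≤ i then colRow (j + 1) ((specTop img).getD t []) (img.getD t [])
        else colRow j ((specTop img).getD t []) (img.getD t []) := by
  have hz : t < ((specTop img).zip img).length := by
    simp [length_specTop]; omega
  rw [List.getD_eq_getElem _ _ (by rw [length_colmixP]; omega)]
  unfold colmixP
  rw [List.getElem_mapIdx]
  rw [List.getElem_zip]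
  rw [List.getD_eq_getElem _ _ (by rw [length_specTop]; omega), List.getD_eq_getElem _ _ ht]

theorem colmixP_zero (img : List (List Int)) (j : Nat) :
    colmixP img j 0 = colmix img j := by
  apply List.ext_getElem (by simp [length_colmixP, length_colmix])
  intro t h1 h2
  have ht : t < img.length := by rw [length_colmixP] at h1; omega
  have hmap : (colmix img j)[t] = colRow j ((specTop img).getD t []) (img.getD t []) := by
    unfold colmix
    rw [List.getElem_map, List.getElem_zip,
      List.getD_eq_getElem _ _ (by rw [length_specTop]; omega), List.getD_eq_getElem _ _ ht]
  rw [hmap, ← List.getD_eq_getElem _ ([] : List Int) h1, getD_colmixP img j 0 t ht]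
  by_cases h0 : t = 0
  · subst h0
    rw [if_pos le_rfl, specTop_zero, colRow_same, colRow_same]
  · rw [if_neg (by omega)]

theorem colmixP_stable (img : List (List Int)) (j i : Nat)
    (h : colRow (j + 1) ((specTop img).getD (i + 1) []) (img.getD (i + 1) [])
         = colRow j ((specTop img).getD (i + 1) []) (img.getD (i + 1) [])) :
    colmixP img j (i + 1) = colmixP img j i := by
  apply List.ext_getElem (by simp [length_colmixP])
  intro t h1 h2
  have ht : t < img.length := by rw [length_colmixP] at h1; omega
  rw [← List.getD_eq_getElem _ ([] : List Int) h1, ← List.getD_eq_getElem _ ([] : List Int) h2,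
    getD_colmixP img j (i + 1) t ht, getD_colmixP img j i t ht]
  by_cases hti : t ≤ i
  · rw [if_pos (by omega), if_pos hti]
  · by_cases hti1 : t ≤ i + 1
    · have : t = i + 1 := by omega
      subst this
      rw [if_pos le_rfl, if_neg hti, h]
    · rw [if_neg hti1, if_neg hti]

theorem colmixP_set (img : List (List Int)) (j i : Nat) :
    (colmixP img j i).set (i + 1)
        (colRow (j + 1) ((specTop img).getD (i + 1) []) (img.getD (i + 1) []))
      = colmixP img j (i + 1) := by
  apply List.ext_getElem (by simp [length_colmixP])
  intro t h1 h2
  have ht : t < img.length := by rw [length_colmixP] at h2; omega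
  rw [List.getElem_set, ← List.getD_eq_getElem _ ([] : List Int) h2,
    getD_colmixP img j (i + 1) t ht]
  by_cases hte : i + 1 = t
  · subst hte
    rw [if_pos rfl, if_pos le_rfl]
  · rw [if_neg hte, ← List.getD_eq_getElem _ ([] : List Int) (by rw [length_colmixP]; omega),
      getD_colmixP img j i t ht]
    by_cases hti : t ≤ i
    · rw [if_pos hti, if_pos (by omega)]
    · rw [if_neg hti, if_neg (by omega)]

theorem colmixP_full (img : List (List Int)) (j i : Nat) (h : img.length ≤ i + 1) :
    colmixP img j i = colmix img (j + 1) := by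
  apply List.ext_getElem (by simp [length_colmixP, length_colmix])
  intro t h1 h2
  have ht : t < img.length := by rw [length_colmixP] at h1; omega
  have hmap : (colmix img (j + 1))[t] = colRow (j + 1) ((specTop img).getD t []) (img.getD t []) := by
    unfold colmix
    rw [List.getElem_map, List.getElem_zip,
      List.getD_eq_getElem _ _ (by rw [length_specTop]; omega), List.getD_eq_getElem _ _ ht]
  rw [hmap, ← List.getD_eq_getElem _ ([] : List Int) h1, getD_colmixP img j i t ht,
    if_pos (by omega)]

theorem active_iff (img : List (List Int)) (i j : Nat) :
    activeS img i j = true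
      ↔ (((specTop img).getD i []).getD j (-1) = 0 ∨ ((specTop img).getD i []).getD j (-1) = 1) := by
  unfold activeS
  by_cases hj : j < (img.getD i []).length
  · have hj' : j < ((specTop img).getD i []).length := by rw [rowlen_specTop]; omega
    have he : ((specTop img).getD i []).getD j (-1) = ((specTop img).getD i []).getD j 0 := by
      rw [List.getD_eq_getElem _ _ hj', List.getD_eq_getElem _ _ hj']
    rw [decide_eq_true_iff, he]
    exact ⟨fun h => h.2, fun h => ⟨hj, h⟩⟩
  · have he : ((specTop img).getD i []).getD j (-1) = -1 :=
      List.getD_eq_default _ _ (by rw [rowlen_specTop]; omega)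
    rw [decide_eq_true_iff, he]
    constructor
    · intro h
      exact absurd h.1 hj
    · intro h
      rcases h with h | h <;> norm_num at h

theorem activeS_false (img : List (List Int)) (i j : Nat) (h : (img.getD i []).length ≤ j) :
    activeS img i j = false := by
  unfold activeS
  rw [decide_eq_false_iff_not]
  intro hc
  exact absurd hc.1 (by omega)

theorem activeS_eq (img : List (List Int)) (i j : Nat) (hj : j < (img.getD i []).length) :
    activeS img i j
      = decide (((specTop img).getD i []).getD j 0 = 0 ∨ ((specTop img).getD i []).getD j 0 = 1) := by
  unfold activeS
  rw [decide_eq_decide]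
  exact ⟨fun h => h.2, fun h => ⟨hj, h⟩⟩

theorem inner_partialB (img : List (List Int)) (j : Nat) (i : Nat) (hi : i < img.length) :
    (PySem.List.pyRange 1 ((i : Int) + 1) 1).foldl (rowStepB (j : Int))
        (colmixP img j 0, activeS img 0 j)
      = (colmixP img j i, activeS img i j) := by
  induction i with
  | zero =>
    rw [show ((0 : Nat) : Int) + 1 = 1 by norm_num, PySem.List.pyRange_one_eq_nil le_rfl,
      List.foldl_nil]
  | succ i ih =>
    have hi' : i < img.length := by omega
    rw [show ((i + 1 : Nat) : Int) + 1 = ((i : Int) + 1) + 1 by push_cast; ring,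
      PySem.List.pyRange_one_succ_right (by omega), List.foldl_append, ih hi',
      List.foldl_cons, List.foldl_nil]
    have htn : ((i : Int) + 1).toNat = i + 1 := by omega
    have hlen1 : ((specTop img).getD (i + 1) []).length = (img.getD (i + 1) []).length :=
      rowlen_specTop img (i + 1)
    have hrow : (colmixP img j i).getD (i + 1) []
        = colRow j ((specTop img).getD (i + 1) []) (img.getD (i + 1) []) := by
      rw [getD_colmixP img j i (i + 1) hi, if_neg (by omega)]
    have hrowlen : (colRow j ((specTop img).getD (i + 1) []) (img.getD (i + 1) [])).length
        = (img.getD (i + 1) []).length := length_colRow _ _ _ hlen1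
    simp only [rowStepB, htn, Int.toNat_natCast]
    rw [hrow, hrowlen]
    by_cases hcase : (img.getD (i + 1) []).length ≤ j
    · rw [if_pos (by exact_mod_cast hcase)]
      rw [colmixP_stable img j i
          (colRow_stable j _ _ hlen1 (fun hj => absurd hj (by omega)))]
      rw [activeS_false img (i + 1) j hcase]
    · have hj : j < (img.getD (i + 1) []).length := by omega
      rw [if_neg (by exact_mod_cast hcase)]
      rw [getD_colRow_at j _ _ hlen1 hj]
      have hrec : ((specTop img).getD (i + 1) []).getD j 0
          = cellNew ((specTop img).getD i []) j ((img.getD (i + 1) []).getD j 0) := by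
        rw [specTop_succ img i hi, getD_stepRow _ _ j hj]
      by_cases hv0 : (img.getD (i + 1) []).getD j 0 = FOREGROUND
      · rw [if_pos hv0]
        have hs : ((specTop img).getD (i + 1) []).getD j 0 = (img.getD (i + 1) []).getD j 0 := by
          rw [hrec]
          unfold cellNew
          rw [if_neg (by rw [hv0]; norm_num [FOREGROUND])]
        rw [colmixP_stable img j i (colRow_stable j _ _ hlen1 (fun _ => hs)),
          activeS_eq img (i + 1) j hj, hs, hv0]
        norm_num [FOREGROUND]
      · by_cases hv240 : (img.getD (i + 1) []).getD j 0 = BACKGROUND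
        · rw [if_neg hv0, if_pos hv240]
          cases hac : activeS img i j with
          | true =>
            have hprev := (active_iff img i j).mp hac
            have hs : ((specTop img).getD (i + 1) []).getD j 0 = 1 := by
              rw [hrec]
              unfold cellNew
              rw [if_pos ⟨by rw [hv240]; norm_num [BACKGROUND], hprev⟩]
            rw [if_pos rfl]
            rw [show (MARKED : Int) = ((specTop img).getD (i + 1) []).getD j 0 from hs.symm,
              colRow_set j _ _ hlen1 hj, colmixP_set img j i,
              activeS_eq img (i + 1) j hj, hs]
            norm_num
          | false =>
            have hprev : ¬ (((specTop img).getD i []).getD j (-1) = 0 ∨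
                ((specTop img).getD i []).getD j (-1) = 1) := by
              intro h
              rw [(active_iff img i j).mpr h] at hac
              cases hac
            have hs : ((specTop img).getD (i + 1) []).getD j 0 = (img.getD (i + 1) []).getD j 0 := by
              rw [hrec]
              unfold cellNew
              rw [if_neg (fun h => hprev h.2)]
            rw [if_neg (by simp)]
            rw [colmixP_stable img j i (colRow_stable j _ _ hlen1 (fun _ => hs)),
              activeS_eq img (i + 1) j hj, hs, hv240]
            norm_num [BACKGROUND]
        · rw [if_neg hv0, if_neg hv240]
          have hs : ((specTop img).getD (i + 1) []).getD j 0 = (img.getD (i + 1) []).getD j 0 := by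
            rw [hrec]
            unfold cellNew
            rw [if_neg (fun h => hv240 (by rw [h.1]; norm_num [BACKGROUND]))]
          rw [colmixP_stable img j i (colRow_stable j _ _ hlen1 (fun _ => hs)),
            activeS_eq img (i + 1) j hj, hs]
          have : ((img.getD (i + 1) []).getD j 0 = MARKED)
              ↔ ((img.getD (i + 1) []).getD j 0 = 0 ∨ (img.getD (i + 1) []).getD j 0 = 1) := by
            constructor
            · intro h
              exact Or.inr (by rw [h]; norm_num [MARKED])
            · intro h
              rcases h with h | h
              · exact absurd h (by norm_num [FOREGROUND] at hv0; exact hv0)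
              · rw [h]; norm_num [MARKED]
          rw [decide_eq_decide.mpr this]

theorem colmix_zero (img : List (List Int)) : colmix img 0 = img := by
  apply List.ext_getElem (by simp [length_colmix])
  intro t h1 h2
  unfold colmix colRow
  rw [List.getElem_map, List.getElem_zip]
  simp

theorem colmix_ge (img : List (List Int)) (W : Nat)
    (h : ∀ t < img.length, (img.getD t []).length ≤ W) :
    colmix img W = specTop img := by
  apply List.ext_getElem (by simp [length_colmix, length_specTop])
  intro t h1 h2
  have ht : t < img.length := by rw [length_colmix] at h1; omega
  have hlt : (img.getD t []).length ≤ W := h t ht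
  have hs : t < (specTop img).length := by rw [length_specTop]; omega
  unfold colmix colRow
  rw [List.getElem_map, List.getElem_zip]
  have e1 : (specTop img)[t]'(by simpa using hs) = (specTop img).getD t [] :=
    (List.getD_eq_getElem _ _ hs).symm
  have e2 : img[t]'(by simpa using ht) = img.getD t [] :=
    (List.getD_eq_getElem _ _ ht).symm
  rw [e1, e2, List.take_of_length_le (by rw [rowlen_specTop]; omega),
    List.drop_of_length_le (by omega), List.append_nil]

theorem col_partial (img : List (List Int)) (jn : Nat) :
    (PySem.List.pyRange 0 (jn : Int) 1).foldl colStepB img = colmix img jn := by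
  induction jn with
  | zero =>
    rw [show ((0 : Nat) : Int) = 0 by norm_num, PySem.List.pyRange_one_eq_nil le_rfl,
      List.foldl_nil, colmix_zero]
  | succ jn ih =>
    rw [show ((jn + 1 : Nat) : Int) = (jn : Int) + 1 by push_cast; ring,
      PySem.List.pyRange_one_succ_right (Int.natCast_nonneg jn), List.foldl_append, ih,
      List.foldl_cons, List.foldl_nil]
    by_cases hn : img.length = 0
    · have : img = [] := List.length_eq_zero_iff.mp hn
      subst this
      rfl
    · have hpos : 0 < img.length := by omega
      have hlenm : (colmix img jn).length = img.length := length_colmix img jn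
      have htop : (colmix img jn).getD 0 [] = img.getD 0 [] := by
        rw [List.getD_eq_getElem _ _ (by rw [hlenm]; omega)]
        unfold colmix
        rw [List.getElem_map, List.getElem_zip]
        have e1 : (specTop img)[0]'(by simp [length_specTop]; omega) = (specTop img).getD 0 [] :=
          (List.getD_eq_getElem _ _ (by rw [length_specTop]; omega)).symm
        have e2 : img[0]'(by simpa using hpos) = img.getD 0 [] :=
          (List.getD_eq_getElem _ _ hpos).symm
        rw [e1, e2, specTop_zero, colRow_same]
      simp only [colStepB]
      rw [htop, hlenm]
      have hact : (decide ((jn : Int) < ((img.getD 0 []).length : Int) ∧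
          ((img.getD 0 []).getD ((jn : Int)).toNat 0 = FOREGROUND ∨
            (img.getD 0 []).getD ((jn : Int)).toNat 0 = MARKED)))
          = activeS img 0 jn := by
        unfold activeS
        rw [decide_eq_decide, specTop_zero, Int.toNat_natCast]
        constructor
        · rintro ⟨a, b⟩
          exact ⟨by exact_mod_cast a, by simpa [FOREGROUND, MARKED] using b⟩
        · rintro ⟨a, b⟩
          exact ⟨by exact_mod_cast a, by simpa [FOREGROUND, MARKED] using b⟩
      rw [hact, ← colmixP_zero img jn,
        show ((img.length : Int)) = ((img.length - 1 : Nat) : Int) + 1 by omega,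
        inner_partialB img jn (img.length - 1) (by omega),
        colmixP_full img jn (img.length - 1) (by omega)]

theorem portB_eq_spec (img : List (List Int)) : mBlackTop_alt img = specTop img := by
  unfold mBlackTop_alt
  simp only [List.map_id']
  by_cases hn : img.length = 0
  · rw [if_pos hn]
    have : img = [] := List.length_eq_zero_iff.mp hn
    subst this
    rfl
  · rw [if_neg hn]
    obtain ⟨m, hm⟩ : ∃ m, PySem.List.max? (img.map (fun row => ((row.length : Nat) : Int)))
        (fun x => x) = some m := by
      cases h : PySem.List.max? (img.map (fun row => ((row.length : Nat) : Int))) (fun x => x) with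
      | none =>
        rw [PySem.List.max?_eq_none_iff] at h
        simp at h
        subst h
        simp at hn
      | some m => exact ⟨m, rfl⟩
    have hmem := PySem.List.max?_mem hm
    have hm_nonneg : 0 ≤ m := by
      rcases List.mem_map.mp hmem with ⟨row, _, hrow⟩
      omega
    have hmax : ∀ t < img.length, (img.getD t []).length ≤ m.toNat := by
      intro t ht
      have hmemx : ((img.getD t []).length : Int) ∈ img.map (fun row => ((row.length : Nat) : Int)) :=
        List.mem_map.mpr ⟨img.getD t [], by rw [List.getD_eq_getElem _ _ ht]; exact List.getElem_mem ht, rfl⟩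
      have := PySem.List.max?_isMax hm _ hmemx
      omega
    rw [hm]
    simp only [Option.getD_some]
    rw [show m = ((m.toNat : Nat) : Int) from (Int.toNat_of_nonneg hm_nonneg).symm,
      col_partial img m.toNat, colmix_ge img m.toNat hmax]

-- ===== VERDICT (by name: the statement is the Claim_ definition above) =====
theorem mBlackTop_spec : Claim_equal_mBlackTop := by
  intro img _ _
  unfold Spec_mBlackTop
  rw [portA_eq_spec, portB_eq_spec]
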